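-- pv_equiv track=rewrite | github.com/Kacper1999/text_algorithms | lab6/lecture_dbf.py | sort_rename
-- ===== SOURCE A (Python) =====
-- def sort_rename(seq):
--     last_entry = None
--     i = 0
--     position_to_index = [0] * len(seq)
--     first_entry = dict()
--
--     for entry in sorted([(e, i) for i, e in enumerate(seq)]):
--         if last_entry and last_entry[0] != entry[0]:
--             i += 1
--             first_entry[i] = entry[1]
--
--         position_to_index[entry[1]] = i
--         if last_entry is None:
--             first_entry[0] = entry[1]
--         last_entry = entry
--     return position_to_index, first_entry
-- ===== SOURCE B (Python) =====
-- def sort_rename(seq):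
--     first_pos = {}
--     for i, e in enumerate(seq):
--         if e not in first_pos:
--             first_pos[e] = i
--     sorted_unique = sorted(first_pos)
--     rank = {v: r for r, v in enumerate(sorted_unique)}
--     position_to_index = [rank[e] for e in seq]
--     first_entry = {r: first_pos[v] for r, v in enumerate(sorted_unique)}
--     return position_to_index, first_entry
-- ===== Notes on version B (the rewrite author's own statement) =====
-- stated objective: alternative
-- what changed: A sorts all n (value, index) pairs and scatters counters while scanning them in sorted order; B instead records first occurrences in one original-order pass, sorts only the distinct values, builds a rank dictionary, and gathers position_to_index by lookup in original order.
import Mathlib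
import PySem

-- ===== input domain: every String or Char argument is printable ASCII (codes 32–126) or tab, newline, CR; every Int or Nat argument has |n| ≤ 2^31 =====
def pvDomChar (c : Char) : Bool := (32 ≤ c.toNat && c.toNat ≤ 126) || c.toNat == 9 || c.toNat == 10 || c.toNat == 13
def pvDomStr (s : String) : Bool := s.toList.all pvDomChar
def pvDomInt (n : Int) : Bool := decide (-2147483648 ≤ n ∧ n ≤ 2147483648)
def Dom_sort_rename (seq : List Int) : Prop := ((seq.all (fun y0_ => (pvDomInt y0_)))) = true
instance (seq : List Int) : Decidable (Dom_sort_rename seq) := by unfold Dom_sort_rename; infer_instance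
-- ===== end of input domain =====

-- B replaces A's sorted scatter over (value, index) pairs by a first-occurrence dict, a sort of
-- the distinct values only, and a rank-dict gather in original order (objective: alternative).

-- ===== PORT A =====
-- One iteration of A's for-loop over the sorted (value, index) pairs.  The Python condition
-- 'last_entry and last_entry[0] != entry[0]' is 'some l' (a nonempty tuple is always truthy)
-- together with l.1 ≠ entry.1.  position_to_index[entry[1]] = i is List.set with .toNat:
-- entry.2 comes from enumerate, hence a nonnegative in-range index, so this is exact.
def pvStepA (st : (Option (Int × Int)) × Int × List Int × PySem.Dict Int Int)
    (entry : Int × Int) : (Option (Int × Int)) × Int × List Int × PySem.Dict Int Int :=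
  match st with
  | (last, i, pti, fe) =>
    match last with
    | none => (some entry, i, pti.set entry.2.toNat i, fe.insert 0 entry.2)
    | some l =>
      if l.1 ≠ entry.1 then
        (some entry, i + 1, pti.set entry.2.toNat (i + 1), fe.insert (i + 1) entry.2)
      else
        (some entry, i, pti.set entry.2.toNat i, fe)

-- Python's sorted on tuples is lexicographic: sorted2 with the two components as keys.
def sort_rename (seq : List Int) : List Int × (List (Int × Int)) :=
  let pairs := PySem.List.sorted2 ((PySem.List.enumerate seq).map (fun p => (p.2, p.1)))
      Prod.fst Prod.snd
  let st := pairs.foldl pvStepA (none, 0, List.replicate seq.length 0, PySem.Dict.empty)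
  (st.2.2.1, st.2.2.2.items)

-- ===== PORT B =====
-- Port of Source B.  The lookups rank[e] and first_pos[v] are on keys that are always present
-- (every e ∈ seq is a key of rank, every v of sorted_unique is a key of first_pos), so the
-- Python never raises KeyError there; they are ported as getD _ 0.
def sort_rename_alt (seq : List Int) : List Int × (List (Int × Int)) :=
  let first_pos := (PySem.List.enumerate seq).foldl
      (fun d p => if d.contains p.2 then d else d.insert p.2 p.1)
      (PySem.Dict.empty : PySem.Dict Int Int)
  let sorted_unique := PySem.List.sorted first_pos.keys (fun x => x)
  let rank := (PySem.List.enumerate sorted_unique).foldl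
      (fun d p => d.insert p.2 p.1) (PySem.Dict.empty : PySem.Dict Int Int)
  let position_to_index := seq.map (fun e => rank.getD e 0)
  let first_entry := (PySem.List.enumerate sorted_unique).foldl
      (fun d p => d.insert p.1 (first_pos.getD p.2 0)) (PySem.Dict.empty : PySem.Dict Int Int)
  (position_to_index, first_entry.items)

-- ===== PRECONDITION & SPEC =====
def Spec_sort_rename (seq : List Int) (out : List Int × (List (Int × Int))) : Prop :=
  out = sort_rename_alt seq
instance (seq : List Int) (out : List Int × (List (Int × Int))) :
    Decidable (Spec_sort_rename seq out) := by unfold Spec_sort_rename; infer_instance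

-- ===== CLAIM (what is proved, stated in full; the proofs are below) =====
def Claim_equal_sort_rename : Prop :=
  ∀ (seq : List Int), Dom_sort_rename seq → Spec_sort_rename seq (sort_rename seq)

-- ===== LEMMAS AND PROOFS =====

-- Proof-side canonical data: pvOccF xs v s = indices (offset s) at which v occurs;
-- pvU seq = the distinct values of seq in ascending order; pvRk = rank of a value.
lemma pvMemEnum (xs : List Int) : ∀ (s : Int) (p : Int × Int),
    p ∈ PySem.List.enumerate xs s ↔ ∃ k : Nat, ∃ _ : k < xs.length, p = (s + k, xs[k]) := by
  induction xs with
  | nil => intro s p; simp [PySem.List.enumerate]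
  | cons x xs ih =>
    intro s p
    rw [PySem.List.enumerate_cons]
    simp only [List.mem_cons, ih (s+1) p]
    constructor
    · rintro (rfl | ⟨k, hk, rfl⟩)
      · exact ⟨0, by simp, by simp⟩
      · exact ⟨k+1, by simpa using hk, by simp [Prod.ext_iff]; omega⟩
    · rintro ⟨k, hk, rfl⟩
      cases k with
      | zero => left; simp
      | succ k => right; exact ⟨k, by simpa using hk, by simp [Prod.ext_iff]; omega⟩

lemma pvEnumFstLt (xs : List Int) : ∀ s : Int,
    List.Pairwise (fun p q : Int × Int => p.1 < q.1) (PySem.List.enumerate xs s) := by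
  induction xs with
  | nil => intro s; simp [PySem.List.enumerate]
  | cons x xs ih =>
    intro s
    rw [PySem.List.enumerate_cons]
    refine List.Pairwise.cons ?_ (ih (s+1))
    intro q hq
    obtain ⟨k, hk, rfl⟩ := (pvMemEnum xs (s+1) q).1 hq
    simp; omega

def pvOccF (xs : List Int) (v : Int) (s : Int) : List Int :=
  ((PySem.List.enumerate xs s).filter (fun p => p.2 == v)).map Prod.fst

lemma pvOccF_cons (x : Int) (xs : List Int) (v s : Int) :
    pvOccF (x :: xs) v s = (if x == v then [s] else []) ++ pvOccF xs v (s + 1) := by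
  simp only [pvOccF, PySem.List.enumerate_cons, List.filter_cons]
  by_cases h : x = v <;> simp [h]

lemma pvMemOcc (xs : List Int) (v : Int) : ∀ (s j : Int),
    j ∈ pvOccF xs v s ↔ ∃ k : Nat, ∃ _ : k < xs.length, j = s + k ∧ xs[k] = v := by
  intro s j
  simp only [pvOccF, List.mem_map, List.mem_filter]
  constructor
  · rintro ⟨p, ⟨hp, hv⟩, rfl⟩
    obtain ⟨k, hk, rfl⟩ := (pvMemEnum xs s p).1 hp
    exact ⟨k, hk, rfl, by simpa using hv⟩
  · rintro ⟨k, hk, rfl, hv⟩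
    exact ⟨(s + k, xs[k]), ⟨(pvMemEnum xs s _).2 ⟨k, hk, rfl⟩, by simp [hv]⟩, rfl⟩

lemma pvOccLt (xs : List Int) (v s : Int) :
    List.Pairwise (fun a b : Int => a < b) (pvOccF xs v s) := by
  unfold pvOccF
  exact ((pvEnumFstLt xs s).filter _).map _ (fun a b h => h)

lemma pvOccNeNil (xs : List Int) (v : Int) (hv : v ∈ xs) (s : Int) : pvOccF xs v s ≠ [] := by
  obtain ⟨k, hk, hkv⟩ := List.getElem_of_mem hv
  exact List.ne_nil_of_mem ((pvMemOcc xs v s (s + k)).2 ⟨k, hk, rfl, hkv⟩)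

def pvU (seq : List Int) : List Int :=
  PySem.List.sorted (PySem.Set.ofList seq) (fun x => x)

lemma pvU_nodup (seq : List Int) : (pvU seq).Nodup :=
  by rw [pvU]; exact ((PySem.List.sorted_perm _ _ _).nodup_iff).2 (PySem.Set.nodup_ofList seq)

lemma pvMemU (seq : List Int) (v : Int) : v ∈ pvU seq ↔ v ∈ seq := by
  rw [pvU, (PySem.List.sorted_perm _ _ _).mem_iff]
  exact PySem.Set.mem_ofList seq v

lemma pvU_lt (seq : List Int) : List.Pairwise (fun a b : Int => a < b) (pvU seq) := by
  have h1 : (pvU seq).Pairwise (fun a b : Int => a ≤ b) := PySem.List.sorted_pairwise (PySem.Set.ofList seq) (fun x : Int => x)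
  have h2 : (pvU seq).Pairwise (fun a b : Int => a ≠ b) := pvU_nodup seq
  exact (h1.and h2).imp (fun ⟨hle, hne⟩ => lt_of_le_of_ne hle hne)

lemma pvSorted2Lex (xs : List (Int × Int)) :
    PySem.List.sorted2 xs Prod.fst Prod.snd
      = PySem.List.sorted xs (fun p => (toLex p : Lex (Int × Int))) := by
  rw [PySem.List.sorted_eq_foldl_insertBy]
  simp only [PySem.List.sorted2, Bool.false_eq_true, if_false]
  have hbef : (fun a b : Int × Int =>
        decide (a.1 < b.1) || !decide (b.1 < a.1) && decide (a.2 < b.2))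
      = (fun a b : Int × Int => decide ((toLex a : Lex (Int × Int)) < toLex b)) := by
    funext a b
    rcases lt_trichotomy a.1 b.1 with h | h | h
    · have h3 : (toLex a : Lex (Int × Int)) < toLex b := Prod.Lex.lt_iff.2 (Or.inl h)
      simp [h, h3]
    · have h1 : ¬ a.1 < b.1 := by omega
      have h2 : ¬ b.1 < a.1 := by omega
      have h3 : ((toLex a : Lex (Int × Int)) < toLex b) ↔ a.2 < b.2 := by
        rw [Prod.Lex.lt_iff]; simp [h]
      simp [h1, h2, h3]
    · have h1 : ¬ a.1 < b.1 := by omega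
      have h3 : ¬ ((toLex a : Lex (Int × Int)) < toLex b) := by
        rw [Prod.Lex.lt_iff]; simp; omega
      simp [h1, h, h3]
  rw [hbef]

lemma pvPartitionPerm : ∀ (vs : List Int) (l : List (Int × Int)),
    (∀ p ∈ l, p.1 ∈ vs) → vs.Nodup →
    l.Perm (vs.flatMap (fun v => l.filter (fun p => p.1 == v))) := by
  intro vs
  induction vs with
  | nil =>
    intro l h _
    cases l with
    | nil => simp
    | cons p t => exact absurd (h p (by simp)) (by simp)
  | cons v rest ih =>
    intro l h hnd
    have hsplit := List.filter_append_perm (fun p : Int × Int => p.1 == v) l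
    have hmem : ∀ p ∈ l.filter (fun p : Int × Int => !(p.1 == v)), p.1 ∈ rest := by
      intro p hp
      rw [List.mem_filter] at hp
      have := h p hp.1
      simp at hp
      simp at this
      tauto
    have hih := ih (l.filter (fun p : Int × Int => !(p.1 == v))) hmem (List.Nodup.of_cons hnd)
    have hfix : (rest.flatMap (fun w => (l.filter (fun p : Int × Int => !(p.1 == v))).filter
        (fun p : Int × Int => p.1 == w)))
        = rest.flatMap (fun w => l.filter (fun p : Int × Int => p.1 == w)) := by
      apply List.flatMap_congr  -- maybe wrong name
      intro w hw
      rw [List.filter_filter]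
      apply List.filter_congr
      intro p _
      have hvw : w ≠ v := by rintro rfl; exact (List.nodup_cons.1 hnd).1 hw
      by_cases hpw : p.1 = w <;> simp [hpw, hvw]
    rw [List.flatMap_cons, ← hfix]
    exact hsplit.symm.trans (List.Perm.append_left _ hih)

def pvGrp (seq : List Int) (v : Int) : List (Int × Int) :=
  (pvOccF seq v 0).map (fun j => (v, j))

lemma pvFilterGrp (seq : List Int) (v : Int) :
    ((PySem.List.enumerate seq).map (fun p => (p.2, p.1))).filter (fun p => p.1 == v)
      = pvGrp seq v := by
  unfold pvGrp pvOccF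
  rw [List.filter_map, List.map_map]
  have : ((fun p : Int × Int => p.1 == v) ∘ fun p : Int × Int => (p.2, p.1))
      = fun p : Int × Int => p.2 == v := by funext p; simp
  rw [this]
  apply List.map_congr_left
  intro p hp
  rw [List.mem_filter] at hp
  have : p.2 = v := by simpa using hp.2
  simp [this]

lemma pvPairsEq (seq : List Int) :
    PySem.List.sorted2 ((PySem.List.enumerate seq).map (fun p => (p.2, p.1)))
        Prod.fst Prod.snd
      = (pvU seq).flatMap (pvGrp seq) := by
  rw [pvSorted2Lex]
  apply PySem.List.sorted_eq_of_perm_of_pairwise_lt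
  · have h1 : ∀ p ∈ (PySem.List.enumerate seq).map (fun p : Int × Int => (p.2, p.1)),
        p.1 ∈ pvU seq := by
      intro p hp
      obtain ⟨x, hx, rfl⟩ := List.mem_map.1 hp
      obtain ⟨k, hk, rfl⟩ := (pvMemEnum seq 0 x).1 hx
      exact (pvMemU seq _).2 (by simp)
    have := pvPartitionPerm (pvU seq) _ h1 (pvU_nodup seq)
    simp only [pvFilterGrp] at this
    exact this.symm
  · rw [List.flatMap_def]
    rw [List.pairwise_flatten]
    constructor
    · intro l' hl'
      obtain ⟨v, _, rfl⟩ := List.mem_map.1 hl'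
      exact (pvOccLt seq v 0).map _
        (fun a b h => Prod.Lex.lt_iff.2 (Or.inr ⟨rfl, h⟩))
    · rw [List.pairwise_map]
      refine (pvU_lt seq).imp ?_
      intro v w hvw x hx y hy
      obtain ⟨a, _, rfl⟩ := List.mem_map.1 hx
      obtain ⟨b, _, rfl⟩ := List.mem_map.1 hy
      exact Prod.Lex.lt_iff.2 (Or.inl hvw)

lemma pvAInner (v c : Int) : ∀ (js : List Int) (j' : Int) (pti : List Int)
    (fe : PySem.Dict Int Int),
    (js.map (fun j => (v, j))).foldl pvStepA (some (v, j'), c, pti, fe)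
      = (some (v, js.getLastD j'), c, js.foldl (fun l j => l.set j.toNat c) pti, fe) := by
  intro js
  induction js with
  | nil => intro j' pti fe; simp
  | cons j t ih =>
    intro j' pti fe
    simp only [List.map_cons, List.foldl_cons, List.getLastD_cons]
    rw [show pvStepA (some (v, j'), c, pti, fe) (v, j)
        = (some (v, j), c, pti.set j.toNat c, fe) from by simp [pvStepA]]
    exact ih j (pti.set j.toNat c) fe

lemma pvAOuter (seq : List Int) : ∀ (vs : List Int) (c : Int) (w : Int × Int)
    (pti : List Int) (fe : PySem.Dict Int Int),
    w.1 ∉ vs → vs.Nodup → (∀ v ∈ vs, v ∈ seq) →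
    ∃ w' : Int × Int,
      (vs.flatMap (pvGrp seq)).foldl pvStepA (some w, c, pti, fe)
        = (some w', c + vs.length,
            (PySem.List.enumerate vs (c + 1)).foldl
              (fun l q => (pvOccF seq q.2 0).foldl (fun l j => l.set j.toNat q.1) l) pti,
            (PySem.List.enumerate vs (c + 1)).foldl
              (fun d q => d.insert q.1 ((pvOccF seq q.2 0).headD 0)) fe)
        ∧ w'.1 = vs.getLastD w.1 := by
  intro vs
  induction vs with
  | nil =>
    intro c w pti fe _ _ _
    exact ⟨w, by simp [PySem.List.enumerate], rfl⟩
  | cons v rest ih =>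
    intro c w pti fe hnm hnd hmem
    obtain ⟨js0, hocc⟩ : ∃ js0, pvOccF seq v 0 = js0 := ⟨_, rfl⟩
    cases js0 with
    | nil => exact absurd hocc (pvOccNeNil seq v (hmem v (by simp)) 0)
    | cons j0 js =>
      have hwv : w.1 ≠ v := by intro h; exact hnm (by simp [h])
      have hstep : pvStepA (some w, c, pti, fe) (v, j0)
          = (some (v, j0), c + 1, pti.set j0.toNat (c + 1), fe.insert (c + 1) j0) := by
        simp [pvStepA, hwv]
      obtain ⟨w', hw', hw'1⟩ := ih (c + 1) (v, js.getLastD j0)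
        (js.foldl (fun l j => l.set j.toNat (c + 1)) (pti.set j0.toNat (c + 1)))
        (fe.insert (c + 1) j0)
        (by intro h; exact (List.nodup_cons.1 hnd).1 (by simpa using h))
        (List.nodup_cons.1 hnd).2
        (fun u hu => hmem u (by simp [hu]))
      refine ⟨w', ?_, ?_⟩
      · rw [List.flatMap_cons, List.foldl_append]
        rw [show pvGrp seq v = (v, j0) :: js.map (fun j => (v, j)) from by
          simp [pvGrp, hocc]]
        rw [List.foldl_cons, hstep, pvAInner]
        rw [hw']
        rw [PySem.List.enumerate_cons]
        simp only [List.foldl_cons, List.length_cons, hocc]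
        simp only [Prod.mk.injEq, List.headD_cons, true_and, and_true]
        push_cast; ring
      · rw [hw'1, List.getLastD_cons]

lemma pvAForm (seq : List Int) :
    sort_rename seq
      = ((PySem.List.enumerate (pvU seq)).foldl
            (fun l q => (pvOccF seq q.2 0).foldl (fun l j => l.set j.toNat q.1) l)
            (List.replicate seq.length 0),
         ((PySem.List.enumerate (pvU seq)).foldl
            (fun d q => d.insert q.1 ((pvOccF seq q.2 0).headD 0))
            (PySem.Dict.empty : PySem.Dict Int Int)).items) := by
  unfold sort_rename
  dsimp only
  rw [pvPairsEq]
  cases hU : pvU seq with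
  | nil =>
    have hseq : seq = [] := by
      cases hs : seq with
      | nil => rfl
      | cons x t =>
        have : x ∈ pvU seq := (pvMemU seq x).2 (by simp [hs])
        rw [hU] at this; simp at this
    subst hseq
    simp [PySem.List.enumerate, PySem.Dict.empty]
  | cons u0 us =>
    have hu0U : u0 ∈ pvU seq := by rw [hU]; simp
    obtain ⟨js0, hocc⟩ : ∃ js0, pvOccF seq u0 0 = js0 := ⟨_, rfl⟩
    cases js0 with
    | nil => exact absurd hocc (pvOccNeNil seq u0 ((pvMemU seq u0).1 hu0U) 0)
    | cons j0 js =>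
      have hnd : (pvU seq).Nodup := pvU_nodup seq
      rw [hU] at hnd
      obtain ⟨w', hw', _⟩ := pvAOuter seq us 0 (u0, js.getLastD j0)
        (js.foldl (fun l j => l.set j.toNat 0)
          ((List.replicate seq.length 0).set j0.toNat 0))
        ((PySem.Dict.empty : PySem.Dict Int Int).insert 0 j0)
        (List.nodup_cons.1 hnd).1
        (List.nodup_cons.1 hnd).2
        (fun u hu => (pvMemU seq u).1 (by rw [hU]; simp [hu]))
      rw [List.flatMap_cons]
      rw [show pvGrp seq u0 = (u0, j0) :: js.map (fun j => (u0, j)) from by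
        simp [pvGrp, hocc]]
      rw [List.foldl_append, List.foldl_cons]
      rw [show pvStepA (none, 0, List.replicate seq.length 0, PySem.Dict.empty) (u0, j0)
          = (some (u0, j0), 0, (List.replicate seq.length 0).set j0.toNat 0,
             (PySem.Dict.empty : PySem.Dict Int Int).insert 0 j0) from by simp [pvStepA]]
      rw [pvAInner, hw']
      rw [PySem.List.enumerate_cons]
      simp only [List.foldl_cons, hocc, List.headD_cons]

def pvScatterStep (l : List Int) (q : Int × Int) : List Int := l.set q.2.toNat q.1

def pvW (seq : List Int) : List (Int × Int) :=
  (PySem.List.enumerate (pvU seq)).flatMap (fun q => (pvOccF seq q.2 0).map (fun j => (q.1, j)))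

lemma pvWritesLen (W : List (Int × Int)) (l0 : List Int) :
    (W.foldl pvScatterStep l0).length = l0.length := by
  induction W generalizing l0 with
  | nil => rfl
  | cons p W ih => simp [List.foldl_cons, pvScatterStep, ih]

lemma pvWritesGet (target : Nat → Int) : ∀ (W : List (Int × Int)) (l0 : List Int),
    (∀ p ∈ W, 0 ≤ p.2 ∧ p.2.toNat < l0.length ∧ p.1 = target p.2.toNat) →
    ∀ k : Nat, (l0[k]? = some (target k) ∨ ∃ c, (c, (k : Int)) ∈ W) → k < l0.length →
    (W.foldl pvScatterStep l0)[k]? = some (target k) := by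
  intro W
  induction W with
  | nil =>
    intro l0 _ k hk _
    rcases hk with h | ⟨c, hc⟩
    · simpa using h
    · simp at hc
  | cons p W ih =>
    intro l0 hb k hk hlen
    obtain ⟨hp0, hplen, hpt⟩ := hb p (by simp)
    simp only [List.foldl_cons]
    have hlen1 : (l0.set p.2.toNat p.1).length = l0.length := by simp
    apply ih
    · intro q hq
      obtain ⟨h1, h2, h3⟩ := hb q (by simp [hq])
      exact ⟨h1, by simpa [pvScatterStep] using h2, h3⟩
    · rcases hk with h | ⟨c, hc⟩
      · left
        rw [pvScatterStep, List.getElem?_set]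
        by_cases hjk : p.2.toNat = k
        · simp only [hjk, if_pos, hlen]
          rw [hpt, hjk]
        · simp [hjk, h]
      · rcases List.mem_cons.1 hc with heq | hmem
        · left
          have hk2 : p.2.toNat = k := by
            have h2 := congrArg Prod.snd heq
            simp at h2
            omega
          rw [pvScatterStep, List.getElem?_set]
          simp only [hk2, if_pos, hlen]
          rw [hpt, hk2]
        · right; exact ⟨c, hmem⟩
    · simpa [pvScatterStep] using hlen

def pvRk (seq : List Int) (e : Int) : Int := ((pvU seq).idxOf e : Int)

lemma pvScatterMap (seq : List Int) :
    (PySem.List.enumerate (pvU seq)).foldl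
        (fun l q => (pvOccF seq q.2 0).foldl (fun l j => l.set j.toNat q.1) l)
        (List.replicate seq.length 0)
      = seq.map (pvRk seq) := by
  have hW : (PySem.List.enumerate (pvU seq)).foldl
        (fun l q => (pvOccF seq q.2 0).foldl (fun l j => l.set j.toNat q.1) l)
        (List.replicate seq.length 0)
      = (pvW seq).foldl pvScatterStep (List.replicate seq.length 0) := by
    rw [pvW, List.foldl_flatMap]
    simp only [List.foldl_map, pvScatterStep]
  rw [hW]
  apply List.ext_getElem?
  intro k
  by_cases hk : k < seq.length
  · have htarget : ∀ p ∈ pvW seq, 0 ≤ p.2 ∧ p.2.toNat < (List.replicate seq.length (0:Int)).length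
        ∧ p.1 = (fun k => if h : k < seq.length then pvRk seq seq[k] else 0) p.2.toNat := by
      intro p hp
      obtain ⟨q, hq, hpq⟩ := List.mem_flatMap.1 hp
      obtain ⟨j, hj, rfl⟩ := List.mem_map.1 hpq
      obtain ⟨k', hk', rfl⟩ := (pvMemEnum (pvU seq) 0 q).1 hq
      obtain ⟨k'', hk'', rfl, hv⟩ := (pvMemOcc seq _ 0 j).1 hj
      refine ⟨by omega, by simp; omega, ?_⟩
      simp only []
      have h1 : ((0 : Int) + (k'' : Int)).toNat = k'' := by omega
      rw [h1]
      rw [dif_pos hk'']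
      simp only [hv]
      rw [pvRk]
      rw [(pvU_nodup seq).idxOf_getElem k' hk']
      omega
    have hres := pvWritesGet (fun k => if h : k < seq.length then pvRk seq seq[k] else 0)
      (pvW seq) (List.replicate seq.length 0) htarget k ?_ (by simpa using hk)
    · rw [hres]
      rw [List.getElem?_map]
      rw [List.getElem?_eq_getElem hk]
      simp [hk]
    · right
      refine ⟨pvRk seq seq[k], ?_⟩
      apply List.mem_flatMap.2
      have hmem : seq[k] ∈ pvU seq := (pvMemU seq _).2 (List.getElem_mem hk)
      have hidx : (pvU seq).idxOf seq[k] < (pvU seq).length := List.idxOf_lt_length_of_mem hmem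
      refine ⟨(pvRk seq seq[k], seq[k]), ?_, ?_⟩
      · apply (pvMemEnum (pvU seq) 0 _).2
        exact ⟨(pvU seq).idxOf seq[k], hidx, by simp [pvRk, List.getElem_idxOf hidx]⟩
      · apply List.mem_map.2
        refine ⟨(k : Int), ?_, rfl⟩
        apply (pvMemOcc seq _ 0 _).2
        exact ⟨k, hk, by omega, rfl⟩
  · rw [List.getElem?_eq_none, List.getElem?_eq_none]
    · simp; omega
    · rw [pvWritesLen]; simp; omega

lemma pvContainsInsert (d : PySem.Dict Int Int) (k v q : Int) (hk : ¬ d.contains k = true) :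
    (d.insert k v).contains q = (d.contains q || (k == q)) := by
  have hk2 : ¬ (d.items.any fun p => p.1 == k) = true := by
    simpa [PySem.Dict.contains] using hk
  rw [show (d.insert k v).contains q
      = ((d.items ++ [(k, v)]).any fun p => p.1 == q) from by
    simp only [PySem.Dict.contains, PySem.Dict.items_insert, if_neg hk2]]
  simp [PySem.Dict.contains, List.any_append, Bool.or_comm]

lemma pvItemsFoldlInsertF (f g : (Int × Int) → Int) : ∀ (qs : List (Int × Int))
    (d : PySem.Dict Int Int),
    (∀ q ∈ qs, ¬ d.contains (f q) = true) → (qs.map f).Nodup →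
    (qs.foldl (fun d q => d.insert (f q) (g q)) d).items
      = d.items ++ qs.map (fun q => (f q, g q)) := by
  intro qs
  induction qs with
  | nil => intro d _ _; simp
  | cons q qs ih =>
    intro d hc hnd
    rw [List.map_cons] at hnd
    have hq : ¬ d.contains (f q) = true := hc q (by simp)
    simp only [List.foldl_cons, List.map_cons]
    rw [ih]
    · rw [PySem.Dict.items_insert, if_neg hq]
      simp
    · intro r hr
      rw [pvContainsInsert d (f q) (g q) (f r) hq]
      simp only [Bool.or_eq_true, not_or]
      refine ⟨hc r (by simp [hr]), ?_⟩
      have : f q ≠ f r := by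
        have h1 := (List.nodup_cons.1 hnd).1
        intro h; exact h1 (h ▸ List.mem_map_of_mem hr)
      simpa using this
    · exact (List.nodup_cons.1 hnd).2

lemma pvEnumFstNodup (xs : List Int) (s : Int) :
    ((PySem.List.enumerate xs s).map Prod.fst).Nodup :=
  (List.pairwise_map.2 (pvEnumFstLt xs s)).imp ne_of_lt

lemma pvEnumSndEq (xs : List Int) : ∀ s : Int,
    (PySem.List.enumerate xs s).map Prod.snd = xs := by
  induction xs with
  | nil => intro s; simp [PySem.List.enumerate]
  | cons x t ih => intro s; rw [PySem.List.enumerate_cons]; simp [ih (s + 1)]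

lemma pvEmptyNotContains (q : Int) :
    ¬ (PySem.Dict.empty : PySem.Dict Int Int).contains q = true := by
  simp [PySem.Dict.contains, PySem.Dict.empty]

lemma pvFEItems (seq : List Int) (h : Int → Int) :
    ((PySem.List.enumerate (pvU seq)).foldl (fun d q => d.insert q.1 (h q.2))
        (PySem.Dict.empty : PySem.Dict Int Int)).items
      = (PySem.List.enumerate (pvU seq)).map (fun q => (q.1, h q.2)) := by
  rw [pvItemsFoldlInsertF (fun q => q.1) (fun q => h q.2) _ _
      (fun q _ => pvEmptyNotContains q.1) (pvEnumFstNodup (pvU seq) 0)]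
  simp [PySem.Dict.empty]

lemma pvKeysMem (d : PySem.Dict Int Int) (x : Int) :
    List.contains d.keys x = d.contains x := by
  rcases h : d.contains x with _ | _
  · have := (not_iff_not.2 (PySem.Dict.contains_iff_mem_keys d x)).1 (by simp [h])
    simpa using this
  · have := (PySem.Dict.contains_iff_mem_keys d x).1 h
    simpa using this

lemma pvKeysStep (d : PySem.Dict Int Int) (x s : Int) :
    (if d.contains x then d else d.insert x s).keys = PySem.Set.add d.keys x := by
  rw [PySem.Set.add, PySem.Set.contains, pvKeysMem]
  rcases h : d.contains x with _ | _
  · simp only [Bool.false_eq_true, if_false]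
    rw [PySem.Dict.keys, PySem.Dict.items_insert, if_neg (by simp [h])]
    simp [PySem.Dict.keys]
  · simp

lemma pvFPKeys (xs : List Int) : ∀ (s : Int) (d : PySem.Dict Int Int),
    ((PySem.List.enumerate xs s).foldl
        (fun d p => if d.contains p.2 then d else d.insert p.2 p.1) d).keys
      = PySem.Set.update d.keys xs := by
  induction xs with
  | nil => intro s d; simp [PySem.List.enumerate, PySem.Set.update]
  | cons x t ih =>
    intro s d
    rw [PySem.List.enumerate_cons, List.foldl_cons, ih (s + 1)]
    rw [show PySem.Set.update d.keys (x :: t)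
        = PySem.Set.update (PySem.Set.add d.keys x) t from by simp [PySem.Set.update]]
    rw [pvKeysStep]

lemma pvFPGet (xs : List Int) (v : Int) : ∀ (s : Int) (d : PySem.Dict Int Int),
    ((PySem.List.enumerate xs s).foldl
        (fun d p => if d.contains p.2 then d else d.insert p.2 p.1) d).get? v
      = if d.contains v then d.get? v else (pvOccF xs v s).head? := by
  induction xs with
  | nil =>
    intro s d
    rcases hv : d.contains v with _ | _
    · have hnone : d.get? v = none := by
        rw [PySem.Dict.get?]
        rw [List.find?_eq_none.2]
        · rfl
        · intro p hp
          have := List.any_eq_false.1 (show (d.items.any fun p => p.1 == v) = false from by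
            simpa [PySem.Dict.contains] using hv) p hp
          simpa using this
      simp [PySem.List.enumerate, pvOccF, hnone]
    · simp [PySem.List.enumerate]
  | cons x t ih =>
    intro s d
    rw [PySem.List.enumerate_cons, List.foldl_cons, ih (s + 1), pvOccF_cons]
    rcases hx : d.contains x with _ | _
    · simp only [Bool.false_eq_true, if_false]
      by_cases hvx : v = x
      · subst hvx
        rw [pvContainsInsert d v s v (by simp [hx])]
        simp [hx, PySem.Dict.get?_insert_self]
      · rw [pvContainsInsert d x s v (by simp [hx])]
        have hbv : (x == v) = false := by simp; exact fun h => hvx h.symm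
        simp only [hbv, Bool.or_false]
        rw [PySem.Dict.get?_insert_of_ne d s (fun h => hvx h)]
        simp
    · simp only [if_true]
      by_cases hvx : v = x
      · subst hvx
        simp [hx]
      · have hbv : (x == v) = false := by simp; exact fun h => hvx h.symm
        simp [hbv]

lemma pvRankGet (seq : List Int) (e : Int) (he : e ∈ seq) :
    ((PySem.List.enumerate (pvU seq)).foldl (fun d p => d.insert p.2 p.1)
        (PySem.Dict.empty : PySem.Dict Int Int)).getD e 0 = pvRk seq e := by
  have hsnd : ((PySem.List.enumerate (pvU seq)).map Prod.snd).Nodup := by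
    rw [pvEnumSndEq]; exact pvU_nodup seq
  have hitems := pvItemsFoldlInsertF (fun q => q.2) (fun q => q.1)
    (PySem.List.enumerate (pvU seq)) PySem.Dict.empty
    (fun q _ => pvEmptyNotContains q.2) hsnd
  set D := (PySem.List.enumerate (pvU seq)).foldl (fun d p => d.insert p.2 p.1)
    (PySem.Dict.empty : PySem.Dict Int Int) with hD
  have hit : D.items = (PySem.List.enumerate (pvU seq)).map (fun q => (q.2, q.1)) := by
    rw [hD, hitems]; simp [PySem.Dict.empty]
  have hkeys : D.keys.Nodup := by
    rw [PySem.Dict.keys, hit, List.map_map]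
    have : (Prod.fst ∘ fun q : Int × Int => (q.2, q.1)) = Prod.snd := by funext q; rfl
    rw [this, pvEnumSndEq]
    exact pvU_nodup seq
  have hmemU : e ∈ pvU seq := (pvMemU seq e).2 he
  have hidx : (pvU seq).idxOf e < (pvU seq).length := List.idxOf_lt_length_of_mem hmemU
  have hmem : (e, pvRk seq e) ∈ D.items := by
    rw [hit]
    apply List.mem_map.2
    refine ⟨(pvRk seq e, e), ?_, rfl⟩
    apply (pvMemEnum (pvU seq) 0 _).2
    exact ⟨(pvU seq).idxOf e, hidx, by simp [pvRk, List.getElem_idxOf hidx]⟩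
  exact PySem.Dict.getD_of_mem_items D hmem hkeys 0

lemma pvBForm (seq : List Int) :
    sort_rename_alt seq
      = (seq.map (pvRk seq),
         (PySem.List.enumerate (pvU seq)).map (fun q => (q.1, (pvOccF seq q.2 0).headD 0))) := by
  unfold sort_rename_alt
  dsimp only
  set FP := (PySem.List.enumerate seq).foldl
      (fun d p => if d.contains p.2 then d else d.insert p.2 p.1)
      (PySem.Dict.empty : PySem.Dict Int Int) with hFP
  have hkeys : FP.keys = PySem.Set.ofList seq := by
    rw [hFP, pvFPKeys seq 0 PySem.Dict.empty, PySem.Set.ofList_eq_foldl, PySem.Set.update]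
    rfl
  rw [hkeys]
  rw [show PySem.List.sorted (PySem.Set.ofList seq) (fun x => x) = pvU seq from rfl]
  have hFPget : ∀ v ∈ pvU seq, FP.getD v 0 = (pvOccF seq v 0).headD 0 := by
    intro v hv
    rw [PySem.Dict.getD, hFP, pvFPGet seq v 0 PySem.Dict.empty,
        if_neg (pvEmptyNotContains v)]
    obtain ⟨js0, hocc⟩ : ∃ js0, pvOccF seq v 0 = js0 := ⟨_, rfl⟩
    cases js0 with
    | nil => exact absurd hocc (pvOccNeNil seq v ((pvMemU seq v).1 hv) 0)
    | cons j0 js => rw [hocc]; rfl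
  refine Prod.ext ?_ ?_
  · dsimp only
    apply List.map_congr_left
    intro e he
    exact pvRankGet seq e he
  · dsimp only
    rw [pvFEItems seq (fun v => FP.getD v 0)]
    apply List.map_congr_left
    intro q hq
    obtain ⟨k, hk, rfl⟩ := (pvMemEnum (pvU seq) 0 q).1 hq
    rw [hFPget _ (List.getElem_mem hk)]

-- ===== VERDICT (by name: the statement is the Claim_ definition above) =====
theorem sort_rename_spec : Claim_equal_sort_rename := by
  intro seq _
  unfold Spec_sort_rename
  rw [pvBForm, pvAForm, pvScatterMap, pvFEItems seq (fun v => (pvOccF seq v 0).headD 0)]
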